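-- pv_equiv track=rewrite | github.com/kaleabe-n/Competitve_programming | maximum sum obtained of any permutation.py | maxSumRangeQuery
-- ===== SOURCE A (Python) =====
-- from typing import List
--
-- def maxSumRangeQuery(nums: List[int], requests: List[List[int]]) -> int:
--     prefix = [0]*(len(nums)+1)
--     for start,end in requests:
--         prefix[start]+=1
--         prefix[end+1]-=1
--     prefix.pop()
--     for i in range(1,len(nums)):
--         prefix[i]+=prefix[i-1]
--     prefix.sort()
--     nums.sort()
--     totalSum=0
--     m=10**9+7
--     for i in range(len(nums)):
--         totalSum+=nums[i]*prefix[i]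
--         totalSum%=m
--     return totalSum
-- ===== SOURCE B (Python) =====
-- def maxSumRangeQuery(nums, requests):
--     n = len(nums)
--     events = []
--     for start, end in requests:
--         events.append((start, 1))
--         events.append((end + 1, -1))
--     events.sort(key=lambda e: e[0])
--     freq = []
--     active = 0
--     j = 0
--     for i in range(n):
--         while j < len(events) and events[j][0] <= i:
--             active += events[j][1]
--             j += 1
--         freq.append(active)
--     freq.sort()
--     nums.sort()
--     total = 0
--     for x, f in zip(nums, freq):
--         total += x * f
--     return total % (10 ** 9 + 7)
-- ===== Notes on version B (the rewrite author's own statement) =====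
-- stated objective: alternative
-- what changed: Replaces the difference-array plus in-place prefix-sum frequency computation with a sorted event list ((start,+1),(end+1,-1)) swept with a pointer and a running active count, and takes the modulus once at the end instead of after every addition.
-- outside the precondition, e.g. on maxSumRangeQuery([1, 2], [[-1, 0]]): A returns 1000000006, B returns 2
import Mathlib
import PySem

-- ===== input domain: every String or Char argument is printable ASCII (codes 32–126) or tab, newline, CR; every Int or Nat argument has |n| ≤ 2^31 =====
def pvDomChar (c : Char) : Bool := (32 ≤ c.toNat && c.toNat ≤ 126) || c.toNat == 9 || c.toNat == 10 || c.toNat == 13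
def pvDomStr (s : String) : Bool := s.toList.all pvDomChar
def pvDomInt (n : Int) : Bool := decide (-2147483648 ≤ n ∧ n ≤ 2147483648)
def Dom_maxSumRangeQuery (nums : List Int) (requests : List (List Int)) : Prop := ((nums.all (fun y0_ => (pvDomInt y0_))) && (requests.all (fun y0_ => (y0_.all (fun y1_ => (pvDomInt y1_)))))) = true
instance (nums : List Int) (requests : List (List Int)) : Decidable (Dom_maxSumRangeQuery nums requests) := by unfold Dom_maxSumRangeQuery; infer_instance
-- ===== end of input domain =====

-- B replaces A's difference-array + in-place prefix-sum frequency step by a sorted event sweep with a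
-- running active count, taking the modulus once at the end; both A and B sort `nums` in place in Python
-- (same side effect), and the equivalence proved here is about the return value.


-- ===== PORT A =====
-- prefix[i] += d  (exact for the in-range indices Pre_ admits; pySetD/pyGetD are Python's indexing)
def pvAddAt (l : List Int) (i : Int) (d : Int) : List Int :=
  PySem.List.pySetD l i (PySem.List.pyGetD l i 0 + d)

-- the in-place loop 'for i in range(1,len(prefix)): prefix[i]+=prefix[i-1]' produces exactly these values
def pvPsum : Int → List Int → List Int
  | _, [] => []
  | acc, x :: xs => (acc + x) :: pvPsum (acc + x) xs

-- one iteration of A's first loop: prefix[start]+=1; prefix[end+1]-=1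
def pvStepA (p : List Int) (r : List Int) : List Int :=
  match r with
  | [s, e] => pvAddAt (pvAddAt p s 1) (e + 1) (-1)
  | _ => p        -- Python raises on a request that is not a pair; Pre_ excludes those

def maxSumRangeQuery (nums : List Int) (requests : List (List Int)) : Int :=
  let prefix0 : List Int := List.replicate (nums.length + 1) 0
  let prefix1 := requests.foldl pvStepA prefix0
  let prefix2 := prefix1.dropLast                       -- prefix.pop()
  let prefix3 := pvPsum 0 prefix2
  let prefix4 := PySem.List.sorted prefix3 (fun x => x) false
  let numsS := PySem.List.sorted nums (fun x => x) false
  let m : Int := 10 ^ 9 + 7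
  (List.zip numsS prefix4).foldl (fun t p => PySem.Int.mod (t + p.1 * p.2) m) 0

-- ===== PORT B =====
-- pop events with position <= i, adding their deltas to the active count (B's inner while loop)
def pvConsume : Int → List (Int × Int) → Int → (List (Int × Int) × Int)
  | _, [], a => ([], a)
  | i, (p, d) :: rest, a => if p ≤ i then pvConsume i rest (a + d) else ((p, d) :: rest, a)

-- B's 'for i in range(n)' sweep, recording the active count at each index
def pvSweep : Nat → Int → List (Int × Int) → Int → List Int
  | 0, _, _, _ => []
  | k + 1, i, evs, a =>
    let r := pvConsume i evs a
    r.2 :: pvSweep k (i + 1) r.1 r.2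

-- one iteration of B's event-building loop
def pvStepB (acc : List (Int × Int)) (r : List Int) : List (Int × Int) :=
  match r with
  | [s, e] => acc ++ [(s, 1), (e + 1, -1)]
  | _ => acc      -- Python raises on a request that is not a pair; Pre_ excludes those

def maxSumRangeQuery_alt (nums : List Int) (requests : List (List Int)) : Int :=
  let n := nums.length
  let events := requests.foldl pvStepB ([] : List (Int × Int))
  let sev := PySem.List.sorted events (fun e => e.1) false
  let freq := pvSweep n 0 sev 0
  let freqS := PySem.List.sorted freq (fun x => x) false
  let numsS := PySem.List.sorted nums (fun x => x) false
  let total := (List.zip numsS freqS).foldl (fun t p => t + p.1 * p.2) 0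
  PySem.Int.mod total (10 ^ 9 + 7)

-- ===== PRECONDITION & SPEC =====
-- Pre_ excludes requests that are not pairs or whose endpoints fall outside 0 ≤ start ≤ n and
-- -1 ≤ end ≤ n-1: there A raises ValueError/IndexError, except for negative endpoints down to
-- -(n+1), where A's returned value is an accident of Python's negative-index wraparound.
def Pre_maxSumRangeQuery (nums : List Int) (requests : List (List Int)) : Prop :=
  ∀ r ∈ requests, r.length = 2 ∧ 0 ≤ r.getD 0 0 ∧ r.getD 0 0 ≤ (nums.length : Int) ∧
    0 ≤ r.getD 1 0 + 1 ∧ r.getD 1 0 + 1 ≤ (nums.length : Int)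
instance (nums : List Int) (requests : List (List Int)) : Decidable (Pre_maxSumRangeQuery nums requests) := by
  unfold Pre_maxSumRangeQuery; infer_instance

def pvWitness_maxSumRangeQuery : List Int × List (List Int) := ([3, -1, 4], [[0, 1], [1, 2], [2, 2]])

def Spec_maxSumRangeQuery (nums : List Int) (requests : List (List Int)) (out : Int) : Prop := out = maxSumRangeQuery_alt nums requests
instance (nums : List Int) (requests : List (List Int)) (out : Int) : Decidable (Spec_maxSumRangeQuery nums requests out) := by unfold Spec_maxSumRangeQuery; infer_instance

-- ===== CLAIM (what is proved, stated in full; the proofs are below) =====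
def Claim_equal_maxSumRangeQuery : Prop := ∀ (nums : List Int) (requests : List (List Int)), Dom_maxSumRangeQuery nums requests → Pre_maxSumRangeQuery nums requests → Spec_maxSumRangeQuery nums requests (maxSumRangeQuery nums requests)

-- ===== LEMMAS AND PROOFS =====

-- the coverage weight an event list assigns to index i
def pvS (evs : List (Int × Int)) (i : Int) : Int :=
  (evs.map (fun e => if e.1 ≤ i then e.2 else 0)).sum

theorem pvS_perm {evs evs' : List (Int × Int)} (h : evs.Perm evs') (i : Int) :
    pvS evs i = pvS evs' i := by
  unfold pvS; exact (h.map _).sum_eq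

theorem pvS_eq_zero {evs : List (Int × Int)} {i : Int} (h : ∀ e ∈ evs, ¬ e.1 ≤ i) :
    pvS evs i = 0 := by
  unfold pvS
  induction evs with
  | nil => simp
  | cons e t ih =>
    simp only [List.map_cons, List.sum_cons]
    rw [if_neg (h e (List.mem_cons_self)), ih (fun x hx => h x (List.mem_cons_of_mem _ hx))]
    simp

theorem pvConsume_spec : ∀ (evs : List (Int × Int)) (a i : Int),
    evs.Pairwise (fun x y => x.1 ≤ y.1) →
    (pvConsume i evs a).2 = a + pvS evs i ∧
    (pvConsume i evs a).1.Pairwise (fun x y => x.1 ≤ y.1) ∧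
    ∀ j : Int, i ≤ j → pvS evs j = pvS evs i + pvS (pvConsume i evs a).1 j := by
  intro evs
  induction evs with
  | nil => intro a i _; refine ⟨by simp [pvConsume, pvS], by simp [pvConsume], ?_⟩
           intro j _; simp [pvConsume, pvS]
  | cons e t ih =>
    intro a i hp
    obtain ⟨p, d⟩ := e
    rcases List.pairwise_cons.mp hp with ⟨hhead, htail⟩
    by_cases hpi : p ≤ i
    · simp only [pvConsume, if_pos hpi]
      have ih' := ih (a + d) i htail
      refine ⟨?_, ih'.2.1, ?_⟩
      · rw [ih'.1]; simp only [pvS, List.map_cons, List.sum_cons, if_pos hpi]; ring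
      · intro j hj
        have hpj : p ≤ j := le_trans hpi hj
        have h3 := ih'.2.2 j hj
        simp only [pvS, List.map_cons, List.sum_cons, if_pos hpi, if_pos hpj] at *
        omega
    · have hz : pvS ((p, d) :: t) i = 0 := by
        refine pvS_eq_zero ?_
        intro x hx
        rcases List.mem_cons.mp hx with h | h
        · subst h; exact hpi
        · exact fun hle => hpi (le_trans (hhead x h) hle)
      simp only [pvConsume, if_neg hpi]
      exact ⟨by omega, hp, fun j _ => by omega⟩

theorem pvSweep_spec : ∀ (k : Nat) (i : Int) (evs : List (Int × Int)) (a : Int),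
    evs.Pairwise (fun x y => x.1 ≤ y.1) →
    pvSweep k i evs a = (List.range k).map (fun t : Nat => a + pvS evs (i + (t : Int))) := by
  intro k
  induction k with
  | zero => intro i evs a _; simp [pvSweep]
  | succ k ih =>
    intro i evs a hp
    obtain ⟨h2, hp', h3⟩ := pvConsume_spec evs a i hp
    simp only [pvSweep]
    rw [ih (i + 1) _ _ hp', List.range_succ_eq_map]
    simp only [List.map_cons, List.map_map]
    congr 1
    · rw [h2]; simp
    · apply List.map_congr_left
      intro t _
      simp only [Function.comp]
      have h4 := h3 (i + 1 + (t : Int)) (by omega)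
      rw [h2]
      push_cast
      ring_nf at h4 ⊢
      omega

-- getD after an in-range point update
theorem pvAddAt_getD (l : List Int) (i d : Int) (j : Nat) (hj : j < l.length)
    (h0 : 0 ≤ i) (h1 : i < (l.length : Int)) :
    (pvAddAt l i d).getD j 0 = l.getD j 0 + (if i = (j : Int) then d else 0) := by
  unfold pvAddAt
  rw [PySem.List.pySetD_of_nonneg _ _ h0]
  have hlt : i.toNat < l.length := by omega
  by_cases hij : i = (j : Int)
  · have : i.toNat = j := by omega
    subst this
    rw [if_pos hij, List.getD_eq_getElem _ _ (by simpa [List.length_set] using hj)]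
    simp only [List.getElem_set_self]
    rw [PySem.List.pyGetD_eq_getElem _ _ h0 h1, List.getD_eq_getElem _ _ hj]
  · have hne : i.toNat ≠ j := by omega
    rw [if_neg hij, List.getD_eq_getElem _ _ (by simpa [List.length_set] using hj),
        List.getD_eq_getElem _ _ hj]
    simp [List.getElem_set_ne hne, add_zero]

theorem pvAddAt_length (l : List Int) (i d : Int) : (pvAddAt l i d).length = l.length := by
  unfold pvAddAt
  exact PySem.List.length_pySetD ..

-- shape of a valid request under Pre_
def pvValid (n : Nat) (r : List Int) : Prop :=
  ∃ s e : Int, r = [s, e] ∧ 0 ≤ s ∧ s ≤ (n : Int) ∧ 0 ≤ e + 1 ∧ e + 1 ≤ (n : Int)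

theorem pvValid_of_pre {nums : List Int} {requests : List (List Int)}
    (h : Pre_maxSumRangeQuery nums requests) : ∀ r ∈ requests, pvValid nums.length r := by
  intro r hr
  obtain ⟨hl, h1, h2, h3, h4⟩ := h r hr
  match r, hl with
  | [s, e], _ => exact ⟨s, e, rfl, by simpa using h1, by simpa using h2, by simpa using h3, by simpa using h4⟩

-- A's diff-array fold vs B's event fold: same length, and getD j = initial + event weight at j
theorem pvFold_spec (n : Nat) : ∀ (requests : List (List Int)) (p : List Int) (acc : List (Int × Int)),
    (∀ r ∈ requests, pvValid n r) → p.length = n + 1 →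
    (requests.foldl pvStepA p).length = n + 1 ∧
    ∀ j : Nat, j < n + 1 →
      (requests.foldl pvStepA p).getD j 0
      = p.getD j 0 + (((requests.foldl pvStepB acc).map (fun e => if e.1 = (j : Int) then e.2 else 0)).sum)
          - ((acc.map (fun e => if e.1 = (j : Int) then e.2 else 0)).sum) := by
  intro requests
  induction requests with
  | nil => intro p acc _ hlen; exact ⟨hlen, fun j _ => by simp⟩
  | cons r rs ih =>
    intro p acc hv hlen
    obtain ⟨s, e, hre, hs0, hs1, he0, he1⟩ := hv r (List.mem_cons_self)
    subst hre
    have hlen1 : (pvAddAt (pvAddAt p s 1) (e + 1) (-1)).length = n + 1 := by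
      rw [pvAddAt_length, pvAddAt_length, hlen]
    have ih' := ih (pvAddAt (pvAddAt p s 1) (e + 1) (-1)) (acc ++ [(s, 1), (e + 1, -1)])
      (fun r hr => hv r (List.mem_cons_of_mem _ hr)) hlen1
    refine ⟨by simpa using ih'.1, ?_⟩
    intro j hj
    simp only [List.foldl_cons, pvStepA, pvStepB]
    rw [ih'.2 j hj]
    have hj1 : j < (pvAddAt p s 1).length := by rw [pvAddAt_length, hlen]; omega
    have hj0 : j < p.length := by rw [hlen]; omega
    rw [pvAddAt_getD _ _ _ _ hj1 (by omega) (by rw [pvAddAt_length, hlen]; push_cast; omega),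
        pvAddAt_getD _ _ _ _ hj0 hs0 (by rw [hlen]; push_cast; omega)]
    simp only [List.map_append, List.sum_append, List.map_cons, List.map_nil, List.sum_cons,
      List.sum_nil]
    ring

-- pvPsum is the list of partial sums
theorem pvPsum_eq : ∀ (l : List Int) (a : Int),
    pvPsum a l = (List.range l.length).map (fun t => a + (l.take (t + 1)).sum) := by
  intro l
  induction l with
  | nil => intro a; simp [pvPsum]
  | cons x xs ih =>
    intro a
    simp only [pvPsum, List.length_cons, List.range_succ_eq_map, List.map_cons, List.map_map]
    congr 1
    · simp
    · rw [ih (a + x)]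
      apply List.map_congr_left
      intro t _
      simp [Function.comp, List.take_succ_cons]
      ring

theorem pvTake_sum (l : List Int) : ∀ (k : Nat), k ≤ l.length →
    (l.take k).sum = ((List.range k).map (fun j => l.getD j 0)).sum := by
  induction l with
  | nil => intro k hk
           have : k = 0 := by simpa using hk
           subst this; simp
  | cons x xs ih =>
    intro k hk
    cases k with
    | zero => simp
    | succ k =>
      rw [List.take_succ_cons, List.sum_cons, List.range_succ_eq_map, List.map_cons,
        List.sum_cons, List.map_map]
      simp only [List.getD_cons_zero]
      congr 1
      rw [ih k (by simpa using hk)]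
      apply congrArg
      apply List.map_congr_left
      intro t _
      simp [Function.comp]

theorem pvIndicator_sum (p d : Int) (h0 : 0 ≤ p) : ∀ (k : Nat),
    ((List.range k).map (fun j : Nat => if p = (j : Int) then d else 0)).sum
      = if p ≤ (k : Int) - 1 then d else 0 := by
  intro k
  induction k with
  | zero => simp; omega
  | succ k ih =>
    rw [List.range_succ, List.map_append, List.sum_append, ih]
    simp only [List.map_cons, List.map_nil, List.sum_cons, List.sum_nil, add_zero]
    by_cases h : p = (k : Int)
    · rw [if_neg (by omega), if_pos h, if_pos (by push_cast; omega)]; ring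
    · rw [if_neg h, add_zero]
      by_cases h2 : p ≤ (k : Int) - 1
      · rw [if_pos h2, if_pos (by push_cast; omega)]
      · rw [if_neg h2, if_neg (by push_cast; omega)]

-- summing the per-index event weights up to t gives the coverage count pvS at t
theorem pvD_sum_eq_pvS : ∀ (evs : List (Int × Int)), (∀ e ∈ evs, 0 ≤ e.1) → ∀ (k : Nat),
    ((List.range k).map (fun j : Nat => (evs.map (fun e => if e.1 = (j : Int) then e.2 else 0)).sum)).sum
      = pvS evs ((k : Int) - 1) := by
  intro evs
  induction evs with
  | nil => intro _ k; simp [pvS]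
  | cons e t ih =>
    intro h k
    obtain ⟨p, d⟩ := e
    have hsplit : ∀ j : Nat, (((p, d) :: t).map (fun e => if e.1 = (j : Int) then e.2 else 0)).sum
        = (if p = (j : Int) then d else 0) + ((t.map (fun e => if e.1 = (j : Int) then e.2 else 0)).sum) := by
      intro j; simp
    calc ((List.range k).map (fun j : Nat => (((p, d) :: t).map (fun e => if e.1 = (j : Int) then e.2 else 0)).sum)).sum
        = ((List.range k).map (fun j : Nat => (if p = (j : Int) then d else 0)
            + ((t.map (fun e => if e.1 = (j : Int) then e.2 else 0)).sum))).sum := by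
          apply congrArg; exact List.map_congr_left (fun j _ => hsplit j)
      _ = ((List.range k).map (fun j : Nat => if p = (j : Int) then d else 0)).sum
            + ((List.range k).map (fun j : Nat => (t.map (fun e => if e.1 = (j : Int) then e.2 else 0)).sum)).sum := by
          rw [← List.sum_map_add]
      _ = (if p ≤ (k : Int) - 1 then d else 0) + pvS t ((k : Int) - 1) := by
          rw [pvIndicator_sum p d (h (p, d) List.mem_cons_self) k,
              ih (fun x hx => h x (List.mem_cons_of_mem _ hx)) k]
      _ = pvS ((p, d) :: t) ((k : Int) - 1) := by simp [pvS]

-- per-step modulus equals one modulus at the end (m = 10^9+7 > 0)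
theorem pvFold_mod (m : Int) (hm : 0 < m) : ∀ (l : List (Int × Int)) (t : Int),
    l.foldl (fun t p => PySem.Int.mod (t + p.1 * p.2) m) (PySem.Int.mod t m)
      = PySem.Int.mod (l.foldl (fun t p => t + p.1 * p.2) t) m := by
  intro l
  induction l with
  | nil => intro t; rfl
  | cons x xs ih =>
    intro t
    simp only [List.foldl_cons]
    rw [← ih (t + x.1 * x.2)]
    congr 1
    rw [PySem.Int.mod_eq_emod_of_pos hm, PySem.Int.mod_eq_emod_of_pos hm,
        PySem.Int.mod_eq_emod_of_pos hm, Int.emod_add_emod]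

-- pvFold_mod started at 0
theorem pvFold_mod0 (m : Int) (hm : 0 < m) (l : List (Int × Int)) :
    l.foldl (fun t p => PySem.Int.mod (t + p.1 * p.2) m) 0
      = PySem.Int.mod (l.foldl (fun t p => t + p.1 * p.2) 0) m := by
  have h := pvFold_mod m hm l 0
  rwa [show PySem.Int.mod 0 m = 0 by rw [PySem.Int.mod_eq_emod_of_pos hm]; simp] at h

-- every event position produced from valid requests is nonnegative
theorem pvEvents_nonneg (n : Nat) : ∀ (requests : List (List Int)) (acc : List (Int × Int)),
    (∀ r ∈ requests, pvValid n r) → (∀ e ∈ acc, 0 ≤ e.1) →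
    ∀ e ∈ requests.foldl pvStepB acc, 0 ≤ e.1 := by
  intro requests
  induction requests with
  | nil => intro acc _ hacc e he; exact hacc e he
  | cons r rs ih =>
    intro acc hv hacc e he
    obtain ⟨s, t, hre, hs0, _, ht0, _⟩ := hv r (List.mem_cons_self)
    subst hre
    simp only [List.foldl_cons, pvStepB] at he
    refine ih _ (fun r hr => hv r (List.mem_cons_of_mem _ hr)) ?_ e he
    intro x hx
    rcases List.mem_append.mp hx with h | h
    · exact hacc x h
    · simp only [List.mem_cons] at h
      rcases h with h | h | h <;> first | (subst h; simpa) | cases h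

-- the two frequency lists (A's prefix-summed diff array, B's sweep) are EQUAL as lists
theorem pvFreq_eq (nums : List Int) (requests : List (List Int))
    (hv : ∀ r ∈ requests, pvValid nums.length r) :
    pvPsum 0 ((requests.foldl pvStepA (List.replicate (nums.length + 1) 0)).dropLast)
    = pvSweep nums.length 0
        (PySem.List.sorted (requests.foldl pvStepB ([] : List (Int × Int)))
          (fun e => e.1) false) 0 := by
  set n := nums.length with hn
  set events := requests.foldl pvStepB ([] : List (Int × Int)) with hev
  set prefix1 := requests.foldl pvStepA (List.replicate (n + 1) 0) with hpf
  have hpos : ∀ e ∈ events, 0 ≤ e.1 :=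
    pvEvents_nonneg n requests [] hv (by intro e he; cases he)
  obtain ⟨hlen1, hget1⟩ := pvFold_spec n requests (List.replicate (n + 1) 0) [] hv
    (by simp)
  rw [← hpf] at hlen1
  simp only [← hpf, ← hev] at hget1
  -- sweep side
  have hperm : (PySem.List.sorted events (fun e => e.1) false).Perm events :=
    PySem.List.sorted_perm ..
  have hpair : (PySem.List.sorted events (fun e => e.1) false).Pairwise
      (fun x y => x.1 ≤ y.1) := PySem.List.sorted_pairwise ..
  rw [pvSweep_spec n 0 _ 0 hpair]
  -- prefix side
  have hlen2 : prefix1.dropLast.length = n := by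
    rw [List.length_dropLast, hlen1]
    omega
  have hget2 : ∀ j : Nat, j < n → prefix1.dropLast.getD j 0 = prefix1.getD j 0 := by
    intro j hj
    have hj2 : j < prefix1.dropLast.length := by omega
    have hj1 : j < prefix1.length := by omega
    rw [List.getD_eq_getElem _ _ hj2, List.getD_eq_getElem _ _ hj1, List.getElem_dropLast]
  rw [pvPsum_eq, hlen2]
  apply List.map_congr_left
  intro t ht
  have htn : t < n := List.mem_range.mp ht
  rw [pvTake_sum _ (t + 1) (by omega)]
  have hinner : ((List.range (t + 1)).map (fun j => prefix1.dropLast.getD j 0)).sum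
      = ((List.range (t + 1)).map (fun j : Nat =>
          (events.map (fun e => if e.1 = (j : Int) then e.2 else 0)).sum)).sum := by
    apply congrArg
    apply List.map_congr_left
    intro j hjm
    have hjt : j < t + 1 := List.mem_range.mp hjm
    rw [hget2 j (by omega), hget1 j (by omega)]
    simp
  rw [hinner, pvD_sum_eq_pvS events hpos (t + 1)]
  rw [pvS_perm hperm]
  push_cast
  ring_nf

-- ===== VERDICT (by name: the statement is the Claim_ definition above) =====
theorem maxSumRangeQuery_spec : Claim_equal_maxSumRangeQuery := by
  intro nums requests _ hpre
  unfold Spec_maxSumRangeQuery maxSumRangeQuery maxSumRangeQuery_alt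
  have hfreq := pvFreq_eq nums requests (pvValid_of_pre hpre)
  simp only [hfreq]
  exact pvFold_mod0 _ (by norm_num) _
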